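-- pv_equiv track=rewrite | github.com/fbkarsdorp/deepflow | models/loaders.py | buffer_groups
-- ===== SOURCE A (Python) =====
-- def chunks(it, size):
--     buf = []
--     for s in it:
--         buf.append(s)
--         if len(buf) == size:
--             yield buf
--             buf = []
--     if len(buf) > 0:
--         yield buf
--
-- def buffer_groups(groups, batch_size):
--     gchunks = chunks(groups, batch_size)
--
--     while True:
--         try:
--             cgroups = [list(group) for group in next(gchunks)]
--             # sort by number of lines per group in descending order
--             cgroups = sorted(cgroups, key=len, reverse=True)
--             max_lines = len(cgroups[0])
--
--             for _ in range(max_lines):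
--                 batch = []
--                 for group in cgroups:
--                     try:
--                         batch.append(group.pop(0))
--                     except:
--                         pass
--
--                 yield batch
--
--         except StopIteration:
--             break
-- ===== SOURCE B (Python) =====
-- def buffer_groups(groups, batch_size):
--     # Precompute-then-yield: row-scatter into a preallocated transposed table
--     # instead of A's repeated column-gather with destructive pop(0).
--     def emit(chunk):
--         cgroups = sorted((list(g) for g in chunk), key=len, reverse=True)
--         max_lines = len(cgroups[0])
--         batches = [[] for _ in range(max_lines)]
--         for group in cgroups:
--             for j, line in enumerate(group):
--                 batches[j].append(line)
--         return batches
--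
--     chunk = []
--     for g in groups:
--         chunk.append(g)
--         if len(chunk) == batch_size:
--             yield from emit(chunk)
--             chunk = []
--     if chunk:
--         yield from emit(chunk)
-- ===== Notes on version B (the rewrite author's own statement) =====
-- stated objective: alternative
-- what changed: Each chunk is transposed by a single row-scatter into a preallocated table (one pass over each group with enumerate, then the whole table is emitted) instead of A's per-line column-gather that repeatedly pops the head of every group with pop(0) (which shifts the remaining elements) and yields one batch at a time.
import Mathlib
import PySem

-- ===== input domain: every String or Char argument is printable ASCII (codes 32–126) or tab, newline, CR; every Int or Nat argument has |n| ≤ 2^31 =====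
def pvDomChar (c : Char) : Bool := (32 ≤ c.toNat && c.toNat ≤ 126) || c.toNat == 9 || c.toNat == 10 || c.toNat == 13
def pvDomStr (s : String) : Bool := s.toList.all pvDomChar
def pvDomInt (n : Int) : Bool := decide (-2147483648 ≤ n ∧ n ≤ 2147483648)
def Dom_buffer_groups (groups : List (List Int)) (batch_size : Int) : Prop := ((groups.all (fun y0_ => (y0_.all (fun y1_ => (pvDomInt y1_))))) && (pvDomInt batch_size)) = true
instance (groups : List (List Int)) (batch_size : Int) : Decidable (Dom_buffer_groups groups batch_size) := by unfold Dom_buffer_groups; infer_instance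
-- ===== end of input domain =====

-- B transposes each sorted chunk by one row-scatter into a preallocated table and emits it whole,
-- instead of A's per-line column-gather with destructive pop(0); objective: alternative decomposition.
-- A is a generator; its yielded batches are materialised as the returned list. A does not mutate its argument.


-- ===== PORT A =====
-- `chunks(it, size)`: accumulate a buffer, emit it when its length reaches `size`,
-- emit the non-empty remainder at the end (every emitted chunk is non-empty).
def pvChunksGo (size : Int) : List (List Int) → List (List Int) → List (List (List Int))
  | [], buf => if buf.length > 0 then [buf] else []
  | s :: rest, buf =>
    let buf' := buf ++ [s]
    if (buf'.length : Int) = size then buf' :: pvChunksGo size rest []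
    else pvChunksGo size rest buf'

-- one pass of A's inner `for group in cgroups: batch.append(group.pop(0))` with the bare except:
-- returns (the gathered batch, the groups after popping).
def pvPopRow : List (List Int) → List Int × List (List Int)
  | [] => ([], [])
  | g :: rest =>
    let (b, r) := pvPopRow rest
    match g with
    | [] => (b, [] :: r)              -- pop(0) raises IndexError, swallowed: group kept as is
    | x :: t => (x :: b, t :: r)

-- `for _ in range(max_lines): … yield batch`
def pvGather : Nat → List (List Int) → List (List Int)
  | 0, _ => []
  | n + 1, cgs =>
    let (batch, cgs') := pvPopRow cgs
    batch :: pvGather n cgs'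

-- one chunk of A's while-loop body; chunks are never empty, so `cgroups[0]` exists
-- (`head?.getD []` is exact on every chunk pvChunksGo produces).
def pvEmitA (chunk : List (List Int)) : List (List Int) :=
  let cgroups := chunk.map (fun g => g)                              -- list(group) copies
  let cgroups := PySem.List.sorted cgroups (fun g => (g.length : Int)) true  -- sorted(…, key=len, reverse=True)
  let max_lines := (cgroups.head?.getD []).length                    -- len(cgroups[0])
  pvGather max_lines cgroups

def buffer_groups (groups : List (List Int)) (batch_size : Int) : List (List Int) :=
  (pvChunksGo batch_size groups []).flatMap pvEmitA

-- ===== PORT B =====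
-- `for j, line in enumerate(group): batches[j].append(line)` — walk batches and group together
def pvScatterGroup : List (List Int) → List Int → List (List Int)
  | bs, [] => bs
  | [], _ :: _ => []                      -- unreachable: len(group) ≤ max_lines = len(batches)
  | b :: bs, x :: g => (b ++ [x]) :: pvScatterGroup bs g

-- B's emit(chunk): sort, preallocate the table, scatter every group row-wise
def pvEmitB (chunk : List (List Int)) : List (List Int) :=
  let cgroups := PySem.List.sorted (chunk.map (fun g => g)) (fun g => (g.length : Int)) true
  let max_lines := (cgroups.head?.getD []).length
  cgroups.foldl pvScatterGroup (List.replicate max_lines [])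

-- B's driving loop: accumulate a chunk, flush via emit when full, flush the remainder
def pvBGo (batch_size : Int) : List (List Int) → List (List Int) → List (List Int)
  | [], chunk => if chunk.length > 0 then pvEmitB chunk else []
  | g :: rest, chunk =>
    let chunk' := chunk ++ [g]
    if (chunk'.length : Int) = batch_size then pvEmitB chunk' ++ pvBGo batch_size rest []
    else pvBGo batch_size rest chunk'

def buffer_groups_alt (groups : List (List Int)) (batch_size : Int) : List (List Int) :=
  pvBGo batch_size groups []

-- ===== PRECONDITION & SPEC =====
def Spec_buffer_groups (groups : List (List Int)) (batch_size : Int) (out : List (List Int)) : Prop := out = buffer_groups_alt groups batch_size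
instance (groups : List (List Int)) (batch_size : Int) (out : List (List Int)) : Decidable (Spec_buffer_groups groups batch_size out) := by unfold Spec_buffer_groups; infer_instance

-- ===== CLAIM (what is proved, stated in full; the proofs are below) =====
def Claim_equal_buffer_groups : Prop := ∀ (groups : List (List Int)) (batch_size : Int), Dom_buffer_groups groups batch_size → Spec_buffer_groups groups batch_size (buffer_groups groups batch_size)

-- ===== LEMMAS AND PROOFS =====

-- A's pop-row is: heads of the non-empty groups, and all tails.
theorem pvPopRow_eq (cgs : List (List Int)) :
    pvPopRow cgs = (cgs.filterMap List.head?, cgs.map List.tail) := by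
  induction cgs with
  | nil => rfl
  | cons g rest ih => cases g <;> simp [pvPopRow, ih]

-- the gather loop, written with the first column and the tails made explicit
theorem pvGather_succ (n : Nat) (cgs : List (List Int)) :
    pvGather (n + 1) cgs = cgs.filterMap List.head? :: pvGather n (cgs.map List.tail) := by
  simp [pvGather, pvPopRow_eq]

-- the scattered table, read column-first: same recursion as the gather loop
def pvMergeT : List (List Int) → List (List Int) → List (List Int)
  | [], _ => []
  | b :: bs, cgs => (b ++ cgs.filterMap List.head?) :: pvMergeT bs (cgs.map List.tail)

theorem pvMergeT_nil (bs : List (List Int)) : pvMergeT bs [] = bs := by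
  induction bs with
  | nil => rfl
  | cons b bs ih => simp [pvMergeT, ih]

theorem pvMergeT_nil_cons (bs cgs : List (List Int)) :
    pvMergeT bs ([] :: cgs) = pvMergeT bs cgs := by
  induction bs generalizing cgs with
  | nil => rfl
  | cons b bs ih => simp [pvMergeT, ih]

theorem pvScatterGroup_length (bs : List (List Int)) (g : List Int)
    (h : g.length ≤ bs.length) : (pvScatterGroup bs g).length = bs.length := by
  induction bs generalizing g with
  | nil => cases g with
    | nil => rfl
    | cons x t => simp at h
  | cons b bs ih => cases g with
    | nil => rfl
    | cons x t =>
      simp [pvScatterGroup]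
      exact ih t (by simpa using h)

-- scattering one group commutes with the column-first reading of the table
theorem pvMergeT_scatter (bs : List (List Int)) (g : List Int) (cgs : List (List Int))
    (h : g.length ≤ bs.length) :
    pvMergeT (pvScatterGroup bs g) cgs = pvMergeT bs (g :: cgs) := by
  induction bs generalizing g cgs with
  | nil =>
    cases g with
    | nil => rfl
    | cons x t => simp at h
  | cons b bs ih =>
    cases g with
    | nil => simp [pvScatterGroup, pvMergeT, pvMergeT_nil_cons]
    | cons x t =>
      simp [pvScatterGroup, pvMergeT]
      exact ih t (cgs.map List.tail) (by simpa using h)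

-- B's fold over the groups builds exactly the column-first table
theorem pvFoldl_scatter_eq_mergeT (cgs bs : List (List Int))
    (h : ∀ g ∈ cgs, g.length ≤ bs.length) :
    cgs.foldl pvScatterGroup bs = pvMergeT bs cgs := by
  induction cgs generalizing bs with
  | nil => simp [pvMergeT_nil]
  | cons g rest ih =>
    have hg : g.length ≤ bs.length := h g (by simp)
    have hlen := pvScatterGroup_length bs g hg
    rw [List.foldl_cons, ih (pvScatterGroup bs g)
        (fun g' hg' => hlen ▸ h g' (by simp [hg']))]
    exact pvMergeT_scatter bs g rest hg

-- A's gather loop is the column-first table over an empty prefix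
theorem pvGather_eq_mergeT (n : Nat) (cgs : List (List Int)) :
    pvGather n cgs = pvMergeT (List.replicate n []) cgs := by
  induction n generalizing cgs with
  | zero => simp [pvGather, pvMergeT]
  | succ n ih => simp [pvGather_succ, List.replicate_succ, pvMergeT, ih]

-- the two emits agree on every chunk
theorem pvEmitA_eq_pvEmitB (chunk : List (List Int)) : pvEmitA chunk = pvEmitB chunk := by
  unfold pvEmitA pvEmitB
  set cgs := PySem.List.sorted (chunk.map (fun g => g)) (fun g => (g.length : Int)) true with hcgs
  rw [pvFoldl_scatter_eq_mergeT, pvGather_eq_mergeT]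
  intro g hg
  cases hc : cgs with
  | nil => simp [hc] at hg
  | cons m t =>
    have := PySem.List.key_head_sorted_rev_ge (xs := chunk.map (fun g => g))
      (key := fun g => (g.length : Int)) (hcgs ▸ hc) g
      (by have := PySem.List.mem_sorted (x := g) (xs := chunk.map (fun g => g))
            (key := fun g => (g.length : Int)) (rev := true)
          exact this.mp (hcgs ▸ hc ▸ hg))
    have h2 : (g.length : Int) ≤ (m.length : Int) := by simpa using this
    simp only [List.head?_cons, Option.getD_some, List.length_replicate]
    exact_mod_cast h2

-- B's loop is A's chunker followed by emit, flattened
theorem pvBGo_eq (batch_size : Int) (rest chunk : List (List Int)) :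
    pvBGo batch_size rest chunk = (pvChunksGo batch_size rest chunk).flatMap pvEmitA := by
  induction rest generalizing chunk with
  | nil =>
    simp only [pvBGo, pvChunksGo]
    split <;> simp [pvEmitA_eq_pvEmitB]
  | cons g rest ih =>
    simp only [pvBGo, pvChunksGo]
    split <;> simp [pvEmitA_eq_pvEmitB, ih]

-- ===== VERDICT (by name: the statement is the Claim_ definition above) =====
theorem buffer_groups_spec : Claim_equal_buffer_groups := by
  intro groups batch_size _
  unfold Spec_buffer_groups buffer_groups buffer_groups_alt
  rw [pvBGo_eq]
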